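-- pv_equiv track=rewrite | github.com/PaulRoland/AoC-2023 | dag1_imp.py | find_digit
-- ===== SOURCE A (Python) =====
-- def findtext(line,text):
--     location=line.find(text)
--     if location>-1:
--         return location
--     return 99999
--
-- def find_digit(line,digits):
--     # Zoek de positie van de eerste digit in tekst,of zoek de positie van de eerste digit als digit
--     location=99999
--     min_location=99999
--     first_digit=0
--
--     #Itereer over alle items in de digits-dictionary
--     for key,num in digits.items():
--         if key in line:
--             location = findtext(line,key)
--
--         #Als de locatie in de string eerder is dan tot nu toe dan gaan we hem onthouden
--         if location<min_location:
--             min_location=location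
--             first_digit=num
--
--     return first_digit
-- ===== SOURCE B (Python) =====
-- def find_digit(line, digits):
--     # Position-major scan: walk the line left to right and return the value of
--     # the first key (in dict order) that matches at the current position.
--     for i in range(len(line) + 1):
--         for key, num in digits.items():
--             if line.startswith(key, i):
--                 return num
--     return 0
-- ===== Notes on version B (the rewrite author's own statement) =====
-- stated objective: idiomatic
-- what changed: Replaces A's key-major loop of str.find() scans (with its findtext helper, carried-over location variable and running minimum seeded with 99999) by a position-major scan that returns the value of the first key matching at the earliest position; Pre_ excludes lines (of 99999+ characters) on which every occurring key first occurs at position >= 99999, where str.find's position reaches A's 99999 not-found sentinel so A reports no digit (0) while B reports the late match.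
import Mathlib
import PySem

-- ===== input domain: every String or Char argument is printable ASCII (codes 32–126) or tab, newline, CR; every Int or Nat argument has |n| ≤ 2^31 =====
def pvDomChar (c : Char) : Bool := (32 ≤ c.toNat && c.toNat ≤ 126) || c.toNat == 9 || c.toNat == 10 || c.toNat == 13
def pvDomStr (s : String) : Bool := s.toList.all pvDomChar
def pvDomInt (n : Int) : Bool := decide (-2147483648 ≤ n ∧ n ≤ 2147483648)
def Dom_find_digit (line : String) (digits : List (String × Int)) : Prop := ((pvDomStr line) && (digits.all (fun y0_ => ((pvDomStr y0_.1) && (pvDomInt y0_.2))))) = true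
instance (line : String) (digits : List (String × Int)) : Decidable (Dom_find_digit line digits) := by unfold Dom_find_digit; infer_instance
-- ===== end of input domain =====

set_option maxRecDepth 8192


-- B replaces A's key-major loop of find() scans (with its findtext helper, carried-over
-- `location` variable and running minimum seeded with 99999) by a position-major scan
-- returning the first key that matches at the earliest position; Pre_ below excludes the
-- corner where A's 99999 find-sentinel treats a match at position >= 99999 as absent.

-- ===== PORT A =====
def findtext (line text : String) : Int :=
  let location := PySem.Str.find line text
  if location > -1 then location else 99999

-- loop body of A's `for key,num in digits.items()` (state = (location, min_location, first_digit))
def find_digit_step (line : String) (st : Int × Int × Int) (kv : String × Int) : Int × Int × Int :=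
  let location := if PySem.Str.isIn kv.1 line then findtext line kv.1 else st.1
  if location < st.2.1 then (location, location, kv.2) else (location, st.2.1, st.2.2)

def find_digit (line : String) (digits : List (String × Int)) : Int :=
  ((PySem.Dict.ofList digits).items.foldl (find_digit_step line) (99999, 99999, 0)).2.2

-- ===== PORT B =====
-- `line.startswith(key, i)` for 0 ≤ i : exact as startswith on the dropped prefix
def find_digit_alt_scan (line : String) (items : List (String × Int)) (i : Int) : Option Int :=
  (items.find? (fun kv => PySem.Chars.startswith (line.toList.drop i.toNat) kv.1.toList)).map (·.2)

-- `for i in range(len(line)+1): for … return num` with trailing `return 0`, as findSome?/getD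
def find_digit_alt (line : String) (digits : List (String × Int)) : Int :=
  ((PySem.List.pyRange 0 (PySem.Str.len line + 1) 1).findSome?
      (find_digit_alt_scan line (PySem.Dict.ofList digits).items)).getD 0

-- ===== PRECONDITION & SPEC =====
-- Pre_ excludes one corner on which A's and B's readings of "no digit" both have a case:
-- lines (necessarily of 99999+ characters) on which some key occurs but every occurring
-- key first occurs at position >= 99999 — there str.find's position reaches A's 99999
-- "not found" sentinel, so A reports no digit (0) while B reports the late match.
def Pre_find_digit (line : String) (digits : List (String × Int)) : Prop :=
  ∀ kv ∈ digits, PySem.Chars.isIn kv.1.toList line.toList = true →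
    PySem.Chars.find line.toList kv.1.toList < 99999
instance (line : String) (digits : List (String × Int)) : Decidable (Pre_find_digit line digits) := by
  unfold Pre_find_digit; infer_instance

def pvWitness_find_digit : String × (List (String × Int)) := ("xtwo1y", [("1", 1), ("two", 2)])

def Spec_find_digit (line : String) (digits : List (String × Int)) (out : Int) : Prop :=
  out = find_digit_alt line digits
instance (line : String) (digits : List (String × Int)) (out : Int) : Decidable (Spec_find_digit line digits out) := by
  unfold Spec_find_digit; infer_instance

-- ===== CLAIM (what is proved, stated in full; the proofs are below) =====
def Claim_equal_find_digit : Prop := ∀ (line : String) (digits : List (String × Int)), Dom_find_digit line digits → Pre_find_digit line digits → Spec_find_digit line digits (find_digit line digits)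

-- ===== LEMMAS AND PROOFS =====

-- g-value of a key in A: its find() position if present, else A's untouched sentinel 99999
def gv (cs : List Char) (kv : String × Int) : Int :=
  if PySem.Chars.isIn kv.1.toList cs then PySem.Chars.find cs kv.1.toList else 99999

-- A selects the first key whose g-value is the strict minimum below 99999
def qA (cs : List Char) (items : List (String × Int)) (m : Int) (kv : String × Int) : Bool :=
  decide (gv cs kv < m ∧ ∀ kv' ∈ items, gv cs kv' < m → gv cs kv ≤ gv cs kv')

-- B selects the first key present in the line with the minimal find() position
def qB (cs : List Char) (items : List (String × Int)) (kv : String × Int) : Bool :=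
  decide (PySem.Chars.isIn kv.1.toList cs = true ∧ ∀ kv' ∈ items,
    PySem.Chars.isIn kv'.1.toList cs = true →
      PySem.Chars.find cs kv.1.toList ≤ PySem.Chars.find cs kv'.1.toList)

theorem gv_of_in {cs : List Char} {z : String × Int} (h : PySem.Chars.isIn z.1.toList cs = true) :
    gv cs z = PySem.Chars.find cs z.1.toList := by simp [gv, h]

theorem gv_of_not_in {cs : List Char} {z : String × Int} (h : ¬ PySem.Chars.isIn z.1.toList cs = true) :
    gv cs z = 99999 := by simp [gv, h]

theorem sw_false (s p : List Char) : PySem.Chars.startswith s p = false ↔ ¬ p <+: s := by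
  rw [← PySem.Chars.startswith_iff s p]
  cases PySem.Chars.startswith s p <;> simp

theorem find_le_at (cs k : List Char) (j : Nat) (h : k <+: cs.drop j) :
    PySem.Chars.find cs k ≤ (j : Int) := by
  have hin : PySem.Chars.isIn k cs = true := (PySem.Chars.exists_prefix_drop_iff_isIn k cs).mp ⟨j, h⟩
  have h0 : 0 ≤ PySem.Chars.find cs k :=
    (PySem.Chars.find_nonneg_iff cs k).mpr ((PySem.Chars.isIn_iff_infix k cs).mp hin)
  obtain ⟨hs1, hs2⟩ := PySem.Chars.find_spec h0
  have hle : (PySem.Chars.find cs k).toNat ≤ j := by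
    by_contra hcon
    push_neg at hcon
    exact (hs2 j hcon) h
  omega

theorem find_ge_at (cs k : List Char) (a : Nat) (hin : PySem.Chars.isIn k cs = true)
    (h2 : ∀ j < a, ¬ k <+: cs.drop j) : (a : Int) ≤ PySem.Chars.find cs k := by
  have h0 : 0 ≤ PySem.Chars.find cs k :=
    (PySem.Chars.find_nonneg_iff cs k).mpr ((PySem.Chars.isIn_iff_infix k cs).mp hin)
  obtain ⟨hs1, hs2⟩ := PySem.Chars.find_spec h0
  have hge : a ≤ (PySem.Chars.find cs k).toNat := by
    by_contra hcon
    push_neg at hcon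
    exact (h2 _ hcon) hs1
  omega

theorem find_eq_at (cs k : List Char) (a : Nat) (h1 : k <+: cs.drop a)
    (h2 : ∀ j < a, ¬ k <+: cs.drop j) : PySem.Chars.find cs k = (a : Int) := by
  have hin : PySem.Chars.isIn k cs = true := (PySem.Chars.exists_prefix_drop_iff_isIn k cs).mp ⟨a, h1⟩
  have hle := find_le_at cs k a h1
  have hge := find_ge_at cs k a hin h2
  omega

theorem min_first {α : Type} (g : α → Int) : ∀ (l : List α), l ≠ [] → ∃ y ∈ l, ∀ z ∈ l, g y ≤ g z := by
  intro l
  induction l with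
  | nil => simp
  | cons a t ih =>
    intro _
    rcases eq_or_ne t [] with rfl | ht
    · exact ⟨a, by simp⟩
    · obtain ⟨y, hy, hmin⟩ := ih ht
      rcases le_total (g a) (g y) with h | h
      · exact ⟨a, by simp, by
          intro z hz
          rcases List.mem_cons.mp hz with rfl | hz
          · exact le_refl _
          · exact le_trans h (hmin z hz)⟩
      · exact ⟨y, List.mem_cons_of_mem _ hy, by
          intro z hz
          rcases List.mem_cons.mp hz with rfl | hz
          · exact h
          · exact hmin z hz⟩

theorem find?_congr_mem {α : Type} {p q : α → Bool} : ∀ (l : List α), (∀ x ∈ l, p x = q x) → l.find? p = l.find? q := by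
  intro l
  induction l with
  | nil => simp
  | cons a t ih =>
    intro h
    simp only [List.find?_cons]
    rw [h a (by simp)]
    cases q a <;> simp [ih (fun x hx => h x (List.mem_cons_of_mem _ hx))]

-- characterisation of A's loop
theorem foldA (line : String) (items : List (String × Int)) :
    ∀ (l m f : Int), m ≤ l → m ≤ 99999 →
      ((items.foldl (find_digit_step line) (l, m, f)).2.2 =
        match items.find? (qA line.toList items m) with
        | some kv => kv.2
        | none => f) := by
  induction items with
  | nil => intro l m f _ _; simp
  | cons kv0 rest ih =>
    intro l m f hml hm9
    rw [List.foldl_cons]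
    by_cases hlt : gv line.toList kv0 < m
    · have hin : PySem.Chars.isIn kv0.1.toList line.toList = true := by
        by_contra hni
        rw [gv_of_not_in hni] at hlt
        omega
      have hg0 : gv line.toList kv0 = PySem.Chars.find line.toList kv0.1.toList := gv_of_in hin
      have hF0 : (0:Int) ≤ PySem.Chars.find line.toList kv0.1.toList :=
        (PySem.Chars.find_nonneg_iff _ _).mpr ((PySem.Chars.isIn_iff_infix _ _).mp hin)
      have hstep : find_digit_step line (l, m, f) kv0 = (gv line.toList kv0, gv line.toList kv0, kv0.2) := by
        simp only [find_digit_step, findtext, PySem.Str.isIn_eq, PySem.Str.find_eq, hin, if_true]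
        rw [if_pos (by omega : PySem.Chars.find line.toList kv0.1.toList > -1)]
        rw [← hg0, if_pos hlt]
      rw [hstep, ih (gv line.toList kv0) (gv line.toList kv0) kv0.2 le_rfl (by omega)]
      by_cases hstrict : ∃ kv ∈ rest, gv line.toList kv < gv line.toList kv0
      · obtain ⟨w, hw, hwlt⟩ := hstrict
        have hne : (rest.filter (fun z => decide (gv line.toList z < gv line.toList kv0))) ≠ [] := by
          intro hnil
          have : w ∈ rest.filter (fun z => decide (gv line.toList z < gv line.toList kv0)) :=
            List.mem_filter.mpr ⟨hw, by simpa using hwlt⟩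
          rw [hnil] at this
          exact absurd this (List.not_mem_nil)
        obtain ⟨y, hy, hymin⟩ := min_first (gv line.toList) _ hne
        have hyR : y ∈ rest := (List.mem_filter.mp hy).1
        have hylt : gv line.toList y < gv line.toList kv0 := by
          have := (List.mem_filter.mp hy).2
          simpa using this
        have hqy : qA line.toList rest (gv line.toList kv0) y = true := by
          simp only [qA, decide_eq_true_eq]
          exact ⟨hylt, fun z hz hzlt => hymin z (List.mem_filter.mpr ⟨hz, by simpa using hzlt⟩)⟩
        have hsome : (rest.find? (qA line.toList rest (gv line.toList kv0))).isSome :=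
          List.find?_isSome.mpr ⟨y, hyR, hqy⟩
        have hq0 : qA line.toList (kv0 :: rest) m kv0 = false := by
          simp only [qA, decide_eq_false_iff_not]
          rintro ⟨-, hmin⟩
          have := hmin w (List.mem_cons_of_mem _ hw) (by omega)
          omega
        rw [List.find?_cons_of_neg (by simp [hq0])]
        have hcongr : rest.find? (qA line.toList (kv0 :: rest) m) =
            rest.find? (qA line.toList rest (gv line.toList kv0)) := by
          apply find?_congr_mem
          intro z hz
          simp only [qA, decide_eq_decide]
          constructor
          · rintro ⟨hz1, hz2⟩
            have hzlt : gv line.toList z < gv line.toList kv0 := by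
              rcases lt_or_ge (gv line.toList z) (gv line.toList kv0) with h | h
              · exact h
              · have := hz2 w (List.mem_cons_of_mem _ hw) (by omega)
                omega
            exact ⟨hzlt, fun u hu hult => hz2 u (List.mem_cons_of_mem _ hu) (by omega)⟩
          · rintro ⟨hz1, hz2⟩
            refine ⟨by omega, ?_⟩
            intro u hu hum
            rcases List.mem_cons.mp hu with rfl | hu
            · omega
            · rcases lt_or_ge (gv line.toList u) (gv line.toList kv0) with h | h
              · exact hz2 u hu h
              · omega
        rw [hcongr]
        obtain ⟨v, hv⟩ := Option.isSome_iff_exists.mp hsome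
        rw [hv]
      · push_neg at hstrict
        have hnone : rest.find? (qA line.toList rest (gv line.toList kv0)) = none := by
          rw [List.find?_eq_none]
          intro z hz
          simp only [qA, decide_eq_true_eq, not_and]
          intro h
          have := hstrict z hz
          omega
        rw [hnone]
        have hq0 : qA line.toList (kv0 :: rest) m kv0 = true := by
          simp only [qA, decide_eq_true_eq]
          refine ⟨hlt, ?_⟩
          intro u hu hum
          rcases List.mem_cons.mp hu with rfl | hu
          · exact le_rfl
          · exact hstrict u hu
        rw [List.find?_cons_of_pos hq0]
    · have hstep : ∃ l', m ≤ l' ∧ find_digit_step line (l, m, f) kv0 = (l', m, f) := by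
        by_cases hin : PySem.Chars.isIn kv0.1.toList line.toList = true
        · refine ⟨gv line.toList kv0, by omega, ?_⟩
          have hg0 : gv line.toList kv0 = PySem.Chars.find line.toList kv0.1.toList := gv_of_in hin
          have hF0 : (0:Int) ≤ PySem.Chars.find line.toList kv0.1.toList :=
            (PySem.Chars.find_nonneg_iff _ _).mpr ((PySem.Chars.isIn_iff_infix _ _).mp hin)
          simp only [find_digit_step, findtext, PySem.Str.isIn_eq, PySem.Str.find_eq, hin, if_true]
          rw [if_pos (by omega : PySem.Chars.find line.toList kv0.1.toList > -1)]
          rw [← hg0, if_neg hlt]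
        · refine ⟨l, hml, ?_⟩
          rw [Bool.not_eq_true] at hin
          simp only [find_digit_step, PySem.Str.isIn_eq, hin, Bool.false_eq_true, if_false]
          rw [if_neg (by omega : ¬ l < m)]
      obtain ⟨l', hml', hstepe⟩ := hstep
      rw [hstepe, ih l' m f hml' hm9]
      have hq0 : qA line.toList (kv0 :: rest) m kv0 = false := by
        simp only [qA, decide_eq_false_iff_not]
        rintro ⟨h1, -⟩
        exact hlt h1
      rw [List.find?_cons_of_neg (by simp [hq0])]
      have hcongr : rest.find? (qA line.toList (kv0 :: rest) m) =
          rest.find? (qA line.toList rest m) := by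
        apply find?_congr_mem
        intro z hz
        simp only [qA, decide_eq_decide]
        constructor
        · rintro ⟨h1, h2⟩
          exact ⟨h1, fun u hu => h2 u (List.mem_cons_of_mem _ hu)⟩
        · rintro ⟨h1, h2⟩
          refine ⟨h1, ?_⟩
          intro u hu hum
          rcases List.mem_cons.mp hu with rfl | hu
          · exact absurd hum hlt
          · exact h2 u hu hum
      rw [hcongr]

-- characterisation of B's scan: the position-major scan picks the first key present in
-- the line with the minimal find() position
theorem scanB (line : String) (items : List (String × Int)) :
    ∀ (mfuel a : Nat), a + mfuel = line.toList.length + 1 →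
      (∀ kv ∈ items, ∀ j : Nat, j < a → PySem.Chars.startswith (line.toList.drop j) kv.1.toList = false) →
      ((PySem.List.pyRange (a : Int) ((line.toList.length : Int) + 1) 1).findSome?
          (find_digit_alt_scan line items) =
        (items.find? (qB line.toList items)).map (·.2)) := by
  intro mfuel
  induction mfuel with
  | zero =>
    intro a ha hyp
    rw [PySem.List.pyRange_one_eq_nil (by push_cast; omega)]
    simp only [List.findSome?_nil]
    symm
    rw [Option.map_eq_none_iff, List.find?_eq_none]
    intro z hz
    simp only [qB, decide_eq_true_eq]
    rintro ⟨h1, -⟩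
    obtain ⟨j, hj⟩ := (PySem.Chars.exists_prefix_drop_iff_isIn z.1.toList line.toList).mpr h1
    -- there is a match at some position ≤ length < a : contradiction with hyp
    have hj' : ∃ j' < a, z.1.toList <+: line.toList.drop j' := by
      rcases lt_or_ge j a with hja | hja
      · exact ⟨j, hja, hj⟩
      · have hnil : line.toList.drop j = [] := List.drop_eq_nil_of_le (by omega)
        rw [hnil] at hj
        have hz0 : z.1.toList = [] := List.prefix_nil.mp hj
        exact ⟨0, by omega, by rw [hz0]; exact List.nil_prefix⟩
    obtain ⟨j', hj'a, hj'p⟩ := hj'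
    exact (sw_false _ _).mp (hyp z hz j' hj'a) hj'p
  | succ mf ih =>
    intro a ha hyp
    rw [PySem.List.pyRange_one_cons (by push_cast; omega)]
    rw [List.findSome?_cons]
    have hPa : find_digit_alt_scan line items (a : Int) =
        (items.find? (fun kv => PySem.Chars.startswith (line.toList.drop a) kv.1.toList)).map (·.2) := by
      simp [find_digit_alt_scan]
    cases h0 : items.find? (fun kv => PySem.Chars.startswith (line.toList.drop a) kv.1.toList) with
    | none =>
      rw [hPa, h0]
      simp only [Option.map_none]
      have hcast : ((a : Int) + 1) = ((a + 1 : Nat) : Int) := by push_cast; ring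
      rw [hcast]
      apply ih (a + 1) (by omega)
      intro kv hkv j hj
      rcases lt_or_ge j a with hja | hja
      · exact hyp kv hkv j hja
      · have hja' : j = a := by omega
        subst hja'
        exact List.find?_eq_none.mp h0 kv hkv |> fun h => by
          cases hsw : PySem.Chars.startswith (line.toList.drop j) kv.1.toList
          · rfl
          · exact absurd hsw h
    | some kv0 =>
      rw [hPa, h0]
      simp only [Option.map_some]
      have hkv0mem : kv0 ∈ items := List.mem_of_find?_eq_some h0
      have hkv0P : PySem.Chars.startswith (line.toList.drop a) kv0.1.toList = true := by
        simpa using List.find?_some h0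
      have hlow : ∀ kv ∈ items, ∀ j : Nat, j < a → ¬ kv.1.toList <+: line.toList.drop j := by
        intro kv hkv j hj
        exact (sw_false _ _).mp (hyp kv hkv j hj)
      have hkv0pre : kv0.1.toList <+: line.toList.drop a :=
        (PySem.Chars.startswith_iff _ _).mp hkv0P
      have hkv0find : PySem.Chars.find line.toList kv0.1.toList = (a : Int) :=
        find_eq_at _ _ a hkv0pre (hlow kv0 hkv0mem)
      have hkv0in : PySem.Chars.isIn kv0.1.toList line.toList = true :=
        (PySem.Chars.exists_prefix_drop_iff_isIn _ _).mp ⟨a, hkv0pre⟩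
      have hcongr : items.find? (fun kv => PySem.Chars.startswith (line.toList.drop a) kv.1.toList) =
          items.find? (qB line.toList items) := by
        apply find?_congr_mem
        intro z hz
        rw [Bool.eq_iff_iff]
        simp only [qB, decide_eq_true_eq]
        constructor
        · intro hswz
          have hzpre : z.1.toList <+: line.toList.drop a := (PySem.Chars.startswith_iff _ _).mp hswz
          have hzin : PySem.Chars.isIn z.1.toList line.toList = true :=
            (PySem.Chars.exists_prefix_drop_iff_isIn _ _).mp ⟨a, hzpre⟩
          have hzfind : PySem.Chars.find line.toList z.1.toList = (a : Int) :=
            find_eq_at _ _ a hzpre (hlow z hz)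
          refine ⟨hzin, ?_⟩
          intro u hu huin
          have := find_ge_at line.toList u.1.toList a huin (hlow u hu)
          omega
        · rintro ⟨hzin, h2⟩
          have hzge := find_ge_at line.toList z.1.toList a hzin (hlow z hz)
          have hzle : PySem.Chars.find line.toList z.1.toList ≤ (a : Int) := by
            have := h2 kv0 hkv0mem hkv0in
            omega
          have hzfind : PySem.Chars.find line.toList z.1.toList = (a : Int) := le_antisymm hzle hzge
          have h0' : 0 ≤ PySem.Chars.find line.toList z.1.toList := by omega
          obtain ⟨hs1, -⟩ := PySem.Chars.find_spec h0'
          rw [hzfind] at hs1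
          simp only [Int.toNat_natCast] at hs1
          exact (PySem.Chars.startswith_iff _ _).mpr hs1
      rw [← hcongr, h0]
      rfl

theorem A_eq (line : String) (digits : List (String × Int)) :
    find_digit line digits =
      match (PySem.Dict.ofList digits).items.find?
          (qA line.toList (PySem.Dict.ofList digits).items 99999) with
      | some kv => kv.2
      | none => 0 := by
  unfold find_digit
  exact foldA line _ 99999 99999 0 le_rfl le_rfl

theorem B_eq (line : String) (digits : List (String × Int)) :
    find_digit_alt line digits =
      (((PySem.Dict.ofList digits).items.find?
          (qB line.toList (PySem.Dict.ofList digits).items)).map (·.2)).getD 0 := by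
  unfold find_digit_alt
  rw [PySem.Str.len_eq]
  have h := scanB line (PySem.Dict.ofList digits).items (line.toList.length + 1) 0
    (by omega) (by intro kv _ j hj; omega)
  simp only [Nat.cast_zero] at h
  rw [h]

-- every key of the built dict is a key of the input list, and conversely
theorem keys_ofList_iff (digits : List (String × Int)) (k : String) :
    (∃ v, (k, v) ∈ (PySem.Dict.ofList digits).items) ↔ (∃ v, (k, v) ∈ digits) := by
  have hkeys : (PySem.Dict.ofList digits).keys = PySem.Set.ofList (digits.map (·.1)) := by
    show (PySem.Dict.empty.update digits).keys = _
    unfold PySem.Dict.update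
    rw [PySem.Dict.keys_foldl_insert_key digits (·.1) (fun _ p => p.2)]
    rw [PySem.Dict.keys_empty, PySem.Set.update_nil_left]
  have hmem : k ∈ (PySem.Dict.ofList digits).keys ↔ k ∈ digits.map (·.1) := by
    rw [hkeys]
    exact PySem.Set.mem_ofList (digits.map (·.1)) k
  constructor
  · rintro ⟨v, hv⟩
    have : k ∈ (PySem.Dict.ofList digits).keys := by
      simp only [PySem.Dict.keys]
      exact List.mem_map.mpr ⟨(k, v), hv, rfl⟩
    obtain ⟨p, hp, hpk⟩ := List.mem_map.mp (hmem.mp this)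
    refine ⟨p.2, ?_⟩
    obtain ⟨p1, p2⟩ := p
    cases hpk
    exact hp
  · rintro ⟨v, hv⟩
    have : k ∈ (PySem.Dict.ofList digits).keys :=
      hmem.mpr (List.mem_map.mpr ⟨(k, v), hv, rfl⟩)
    simp only [PySem.Dict.keys] at this
    obtain ⟨p, hp, hpk⟩ := List.mem_map.mp this
    refine ⟨p.2, ?_⟩
    obtain ⟨p1, p2⟩ := p
    cases hpk
    exact hp

-- ===== VERDICT (by name: the statements are the Claim_ definitions above) =====
theorem find_digit_spec : Claim_equal_find_digit := by
  intro line digits _ hpre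
  show find_digit line digits = find_digit_alt line digits
  rw [A_eq, B_eq]
  by_cases hex : ∃ kv ∈ digits, PySem.Chars.isIn kv.1.toList line.toList = true
  · -- some key occurs, and (by Pre_) it has find < 99999
    obtain ⟨kv1, hkv1, hkv1in⟩ := hex
    have hkv1lt := hpre kv1 hkv1 hkv1in
    -- transfer kv1's key into the dict's items
    obtain ⟨v1, hv1⟩ := (keys_ofList_iff digits kv1.1).mpr ⟨kv1.2, by
      simpa using hkv1⟩
    have hkv1in' : PySem.Chars.isIn (kv1.1, v1).1.toList line.toList = true := hkv1in
    have hcongr : (PySem.Dict.ofList digits).items.find?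
          (qA line.toList (PySem.Dict.ofList digits).items 99999) =
        (PySem.Dict.ofList digits).items.find?
          (qB line.toList (PySem.Dict.ofList digits).items) := by
      apply find?_congr_mem
      intro z hz
      simp only [qA, qB, decide_eq_decide]
      constructor
      · rintro ⟨h1, h2⟩
        have hzin : PySem.Chars.isIn z.1.toList line.toList = true := by
          by_contra hni
          rw [gv_of_not_in hni] at h1
          omega
        have hgz := gv_of_in hzin
        refine ⟨hzin, ?_⟩
        intro u hu huin
        have hgu := gv_of_in huin
        rcases lt_or_ge (PySem.Chars.find line.toList u.1.toList) 99999 with h | h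
        · have := h2 u hu (by omega)
          omega
        · omega
      · rintro ⟨hzin, h2⟩
        have hgz := gv_of_in hzin
        have hzlt : PySem.Chars.find line.toList z.1.toList < 99999 := by
          have := h2 (kv1.1, v1) hv1 hkv1in'
          have : PySem.Chars.find line.toList z.1.toList ≤
              PySem.Chars.find line.toList kv1.1.toList := this
          omega
        refine ⟨by omega, ?_⟩
        intro u hu hult
        have huin : PySem.Chars.isIn u.1.toList line.toList = true := by
          by_contra hni
          rw [gv_of_not_in hni] at hult
          omega
        have hgu := gv_of_in huin
        have := h2 u hu huin
        omega
    rw [hcongr]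
    cases (PySem.Dict.ofList digits).items.find? (qB line.toList (PySem.Dict.ofList digits).items) <;> rfl
  · -- no key occurs at all: both find? are none
    have hnone : ∀ z ∈ (PySem.Dict.ofList digits).items,
        PySem.Chars.isIn z.1.toList line.toList = false := by
      intro z hz
      by_contra hni
      rw [Bool.not_eq_false] at hni
      obtain ⟨v, hv⟩ := (keys_ofList_iff digits z.1).mp ⟨z.2, by
        simpa using hz⟩
      exact hex ⟨(z.1, v), hv, hni⟩
    have hA : (PySem.Dict.ofList digits).items.find?
        (qA line.toList (PySem.Dict.ofList digits).items 99999) = none := by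
      rw [List.find?_eq_none]
      intro z hz
      simp only [qA, decide_eq_true_eq, not_and]
      intro h1
      exfalso
      have := gv_of_not_in (by rw [hnone z hz]; simp : ¬ PySem.Chars.isIn z.1.toList line.toList = true)
      omega
    have hB : (PySem.Dict.ofList digits).items.find?
        (qB line.toList (PySem.Dict.ofList digits).items) = none := by
      rw [List.find?_eq_none]
      intro z hz
      simp only [qB, decide_eq_true_eq, not_and]
      intro h1
      exfalso
      rw [hnone z hz] at h1
      exact absurd h1 (by simp)
    rw [hA, hB]
    rfl
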